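-- pv_equiv track=rewrite | github.com/BikeMouse/Challenges | codewars/8kyu/returnTwoHighestValuesInList.py | two_highest
-- ===== SOURCE A (Python) =====
-- def two_highest(arg1):
--     if len(arg1) == 0:
--         return []
--     unique = []
--     for i in arg1:
--         if i not in unique:
--             unique.append(i)
--     if len(unique) == 1:
--         return unique
--     unique.sort()
--     result = unique[-2:]
--     return [result[1],result[0]]
-- ===== SOURCE B (Python) =====
-- def two_highest(arg1):
--     best = None
--     second = None
--     for v in arg1:
--         if best is None or v > best:
--             second = best
--             best = v
--         elif v != best and (second is None or v > second):
--             second = v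
--     if best is None:
--         return []
--     if second is None:
--         return [best]
--     return [best, second]
-- ===== Notes on version B (the rewrite author's own statement) =====
-- stated objective: faster
-- what changed: Replaced dedup (quadratic membership scans) + sort + slice with a single linear pass maintaining the best and second-best distinct values.
import Mathlib
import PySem

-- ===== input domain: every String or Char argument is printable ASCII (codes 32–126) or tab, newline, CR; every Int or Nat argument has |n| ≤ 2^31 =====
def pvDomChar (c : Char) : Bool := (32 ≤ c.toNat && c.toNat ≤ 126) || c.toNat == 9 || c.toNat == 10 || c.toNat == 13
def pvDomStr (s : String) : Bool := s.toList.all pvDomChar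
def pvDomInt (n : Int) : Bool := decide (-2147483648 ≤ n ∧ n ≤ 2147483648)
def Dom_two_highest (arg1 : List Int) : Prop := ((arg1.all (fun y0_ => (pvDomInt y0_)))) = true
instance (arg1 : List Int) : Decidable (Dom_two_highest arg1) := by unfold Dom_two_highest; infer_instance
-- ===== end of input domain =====

-- B replaces A's dedup (quadratic membership scans) + sort + slice by one linear
-- pass keeping the best and second-best distinct values (objective: faster).

-- ===== PORT A =====
-- `if i not in unique: unique.append(i)`
def dedupStep (u : List Int) (i : Int) : List Int :=
  if u.contains i then u else u ++ [i]

def two_highest (arg1 : List Int) : List Int :=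
  if arg1.length = 0 then []
  else
    let unique := arg1.foldl dedupStep []
    if unique.length = 1 then unique
    else
      let sortedU := PySem.List.sorted unique (fun x => x) false  -- unique.sort()
      let result := PySem.List.slice sortedU (some (-2)) none      -- unique[-2:]
      match PySem.List.pyGet? result 1, PySem.List.pyGet? result 0 with
      | some r1, some r0 => [r1, r0]
      | _, _ => []  -- unreachable: result has length 2 in this branch

-- ===== PORT B =====
-- the loop body of Source B over state (best, second)
def altStep (p : Option Int × Option Int) (v : Int) : Option Int × Option Int :=
  match p with
  | (none, _) => (some v, none)            -- second := best (= None); best := v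
  | (some b, s) =>
    if b < v then (some v, some b)
    else
      match s with
      | none => if v ≠ b then (some b, some v) else (some b, none)
      | some s' => if v ≠ b ∧ s' < v then (some b, some v) else (some b, some s')

def two_highest_alt (arg1 : List Int) : List Int :=
  match arg1.foldl altStep (none, none) with
  | (none, _) => []
  | (some b, none) => [b]
  | (some b, some s) => [b, s]

-- ===== PRECONDITION & SPEC =====
def Spec_two_highest (arg1 : List Int) (out : List Int) : Prop := out = two_highest_alt arg1
instance (arg1 : List Int) (out : List Int) : Decidable (Spec_two_highest arg1 out) := by unfold Spec_two_highest; infer_instance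

-- ===== CLAIM (what is proved, stated in full; the proofs are below) =====
def Claim_equal_two_highest : Prop := ∀ (arg1 : List Int), Dom_two_highest arg1 → Spec_two_highest arg1 (two_highest arg1)

-- ===== LEMMAS AND PROOFS =====

-- dedup characterization: membership and nodup of A's `unique`
theorem dedup_mem (xs : List Int) : ∀ (u : List Int) (a : Int),
    a ∈ xs.foldl dedupStep u ↔ a ∈ u ∨ a ∈ xs := by
  induction xs with
  | nil => simp
  | cons x xs ih =>
    intro u a
    rw [List.foldl_cons, ih]
    simp only [dedupStep, List.contains_eq_mem]
    by_cases h : x ∈ u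
    · rw [if_pos (by simp [h])]
      constructor
      · rintro (h' | h') <;> tauto
      · rintro (h' | h')
        · tauto
        · cases h' with
          | head => tauto
          | tail _ h'' => tauto
    · rw [if_neg (by simp [h])]
      simp [or_assoc]

theorem dedup_nodup (xs : List Int) : ∀ u : List Int, u.Nodup → (xs.foldl dedupStep u).Nodup := by
  induction xs with
  | nil => exact fun u h => h
  | cons x xs ih =>
    intro u hu
    rw [List.foldl_cons]
    apply ih
    simp only [dedupStep, List.contains_eq_mem]
    by_cases h : x ∈ u
    · rw [if_pos (by simp [h])]; exact hu
    · rw [if_neg (by simp [h])]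
      simp [List.nodup_append, hu]
      exact fun a ha hax => h (hax ▸ ha)

-- invariant of B's linear scan
def InvB (p : List Int) : Option Int × Option Int → Prop
  | (none, s) => p = [] ∧ s = none
  | (some b, none) => b ∈ p ∧ ∀ x ∈ p, x = b
  | (some b, some s) => b ∈ p ∧ (∀ x ∈ p, x ≤ b) ∧ s ∈ p ∧ s < b ∧ ∀ x ∈ p, x < b → x ≤ s

theorem invB_step (p : List Int) (st : Option Int × Option Int) (v : Int)
    (h : InvB p st) : InvB (p ++ [v]) (altStep st v) := by
  obtain ⟨b?, s?⟩ := st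
  cases b? with
  | none =>
    obtain ⟨hp, hs⟩ := h
    subst hp hs
    simp [altStep, InvB]
  | some b =>
    cases s? with
    | none =>
      obtain ⟨hb, hall⟩ := h
      by_cases h1 : b < v
      · simp only [altStep, if_pos h1, InvB, List.mem_append, List.mem_singleton]
        refine ⟨(by simp), ?_, Or.inl hb, h1, ?_⟩
        · rintro x (hx | rfl)
          · exact le_of_lt (hall x hx ▸ h1)
          · exact le_refl x
        · rintro x (hx | rfl) hxv
          · exact le_of_eq (hall x hx)
          · omega
      · by_cases h2 : v = b
        · subst h2
          simp only [altStep, if_neg h1, ne_eq, not_true_eq_false, if_false, InvB,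
            List.mem_append, List.mem_singleton]
          exact ⟨Or.inl hb, by rintro x (hx | rfl); exact hall x hx; rfl⟩
        · have hvb : v < b := lt_of_le_of_ne (not_lt.mp h1) h2
          simp only [altStep, if_neg h1, ne_eq, h2, not_false_eq_true, if_true, InvB,
            List.mem_append, List.mem_singleton]
          refine ⟨Or.inl hb, ?_, (by simp), hvb, ?_⟩
          · rintro x (hx | rfl)
            · exact le_of_eq (hall x hx)
            · exact le_of_lt hvb
          · rintro x (hx | rfl) hxb
            · exact absurd (hall x hx) (by omega)
            · exact le_refl x
    | some s =>
      obtain ⟨hb, hball, hs, hsb, hsall⟩ := h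
      by_cases h1 : b < v
      · simp only [altStep, if_pos h1, InvB, List.mem_append, List.mem_singleton]
        refine ⟨(by simp), ?_, Or.inl hb, h1, ?_⟩
        · rintro x (hx | rfl)
          · exact le_of_lt (lt_of_le_of_lt (hball x hx) h1)
          · exact le_refl x
        · rintro x (hx | rfl) hxv
          · exact hball x hx
          · omega
      · by_cases h2 : v ≠ b ∧ s < v
        · simp only [altStep, if_neg h1, if_pos h2, InvB, List.mem_append, List.mem_singleton]
          have hvb : v < b := lt_of_le_of_ne (not_lt.mp h1) h2.1
          refine ⟨Or.inl hb, ?_, (by simp), hvb, ?_⟩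
          · rintro x (hx | rfl)
            · exact hball x hx
            · exact le_of_lt hvb
          · rintro x (hx | rfl) hxb
            · exact le_of_lt (lt_of_le_of_lt (hsall x hx hxb) h2.2)
            · exact le_refl x
        · simp only [altStep, if_neg h1, if_neg h2, InvB, List.mem_append, List.mem_singleton]
          refine ⟨Or.inl hb, ?_, Or.inl hs, hsb, ?_⟩
          · rintro x (hx | rfl)
            · exact hball x hx
            · exact not_lt.mp h1
          · rintro x (hx | rfl) hxb
            · exact hsall x hx hxb
            · have hvs : x ≤ s := by
                by_contra hc
                exact h2 ⟨by omega, by omega⟩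
              exact hvs

theorem invB_fold (xs : List Int) : ∀ (p : List Int) (st : Option Int × Option Int),
    InvB p st → InvB (p ++ xs) (xs.foldl altStep st) := by
  induction xs with
  | nil => intro p st h; simpa using h
  | cons x xs ih =>
    intro p st h
    have := ih (p ++ [x]) (altStep st x) (invB_step p st x h)
    simpa [List.append_assoc] using this


-- ===== VERDICT (by name: the statement is the Claim_ definition above) =====
theorem two_highest_spec : Claim_equal_two_highest := by
  intro arg1 _
  show two_highest arg1 = two_highest_alt arg1
  have hinv : InvB arg1 (arg1.foldl altStep (none, none)) := by
    have := invB_fold arg1 [] (none, none) (by simp [InvB])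
    simpa using this
  by_cases hemp : arg1.length = 0
  · have h0 : arg1 = [] := List.length_eq_zero_iff.mp hemp
    subst h0
    rfl
  · have hne : arg1 ≠ [] := fun h => hemp (by simp [h])
    have hum : ∀ a, a ∈ arg1.foldl dedupStep [] ↔ a ∈ arg1 := fun a => by
      simpa using dedup_mem arg1 [] a
    have hnd : (arg1.foldl dedupStep []).Nodup := dedup_nodup arg1 [] (by simp)
    have hune : arg1.foldl dedupStep [] ≠ [] := by
      obtain ⟨x, xs, rfl⟩ := List.exists_cons_of_ne_nil hne
      intro h
      have hx : x ∈ (x :: xs).foldl dedupStep [] := (hum x).mpr (by simp)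
      rw [h] at hx
      simp at hx
    by_cases h1 : (arg1.foldl dedupStep []).length = 1
    · -- one distinct value
      obtain ⟨a, ha⟩ : ∃ a, arg1.foldl dedupStep [] = [a] := by
        cases hu : arg1.foldl dedupStep [] with
        | nil => exact absurd hu hune
        | cons y ys =>
          cases ys with
          | nil => exact ⟨y, rfl⟩
          | cons z zs => rw [hu] at h1; simp at h1
      have hall : ∀ x ∈ arg1, x = a := fun x hx => by
        have hx' : x ∈ arg1.foldl dedupStep [] := (hum x).mpr hx
        rw [ha] at hx'
        simpa using hx'
      have hA : two_highest arg1 = [a] := by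
        simp [two_highest, hemp, ha]
      rcases hst : arg1.foldl altStep (none, none) with ⟨b?, s?⟩
      rw [hst] at hinv
      match b?, s? with
      | none, s? => exact absurd hinv.1 hne
      | some b, none =>
        have hb : b ∈ arg1 := hinv.1
        have hB : two_highest_alt arg1 = [b] := by simp [two_highest_alt, hst]
        rw [hA, hB, hall b hb]
      | some b, some s =>
        obtain ⟨hb, _, hs, hsb, _⟩ := hinv
        have h2 := hall b hb
        have h3 := hall s hs
        omega
    · -- at least two distinct values
      have hlen2 : 2 ≤ (arg1.foldl dedupStep []).length := by
        cases hu : arg1.foldl dedupStep [] with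
        | nil => exact absurd hu hune
        | cons y ys =>
          cases ys with
          | nil => rw [hu] at h1; simp at h1
          | cons z zs => simp
      set L := PySem.List.sorted (arg1.foldl dedupStep []) (fun x => x) false with hLdef
      have hperm : L.Perm (arg1.foldl dedupStep []) := PySem.List.sorted_perm ..
      have hLnd : L.Nodup := (hperm.nodup_iff).mpr hnd
      have hpw : L.Pairwise (fun a b => a ≤ b) := by
        simpa using PySem.List.sorted_pairwise (xs := arg1.foldl dedupStep []) (key := fun x => x)
      have hlt : L.Pairwise (· < ·) :=
        (List.Pairwise.and hpw hLnd).imp (fun h => lt_of_le_of_ne h.1 h.2)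
      have hLlen : L.length = (arg1.foldl dedupStep []).length :=
        PySem.List.length_sorted ..
      obtain ⟨M, S, t, hrev⟩ : ∃ M S t, L.reverse = M :: S :: t := by
        have h2 : 2 ≤ L.reverse.length := by simp [hLlen]; omega
        cases hR : L.reverse with
        | nil => rw [hR] at h2; simp at h2
        | cons m r =>
          cases r with
          | nil => rw [hR] at h2; simp at h2
          | cons s' t' => exact ⟨m, s', t', rfl⟩
      have hdecomp : L = t.reverse ++ [S, M] := by
        have h3 := congrArg List.reverse hrev
        simpa using h3
      have hslice : PySem.List.slice L (some (-2)) none = [S, M] := by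
        rw [PySem.List.slice_from_neg_ofNat L 2 (by omega), hdecomp]
        have hlen' : (t.reverse ++ [S, M]).length - 2 = t.reverse.length := by simp
        rw [hlen']
        exact List.drop_left
      -- order facts
      rw [hdecomp] at hlt
      have hsplit := List.pairwise_append.mp hlt
      have hSM : S < M := by
        have h2 := hsplit.2.1
        simp [List.pairwise_cons] at h2
        exact h2
      have hcross : ∀ x ∈ t, x < S := fun x hx =>
        hsplit.2.2 x (List.mem_reverse.mpr hx) S (by simp)
      have hcrossM : ∀ x ∈ t, x < M := fun x hx =>
        hsplit.2.2 x (List.mem_reverse.mpr hx) M (by simp)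
      have hmemL : ∀ x, x ∈ L ↔ x ∈ arg1 := fun x => (hperm.mem_iff).trans (hum x)
      have hM : M ∈ arg1 := (hmemL M).mp (by rw [hdecomp]; simp)
      have hS : S ∈ arg1 := (hmemL S).mp (by rw [hdecomp]; simp)
      have hMmax : ∀ x ∈ arg1, x ≤ M := fun x hx => by
        have hxL : x ∈ L := (hmemL x).mpr hx
        rw [hdecomp] at hxL
        simp at hxL
        rcases hxL with hx' | rfl | rfl
        · exact le_of_lt (hcrossM x hx')
        · exact le_of_lt hSM
        · exact le_refl x
      have hSsec : ∀ x ∈ arg1, x ≠ M → x ≤ S := fun x hx hxM => by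
        have hxL : x ∈ L := (hmemL x).mpr hx
        rw [hdecomp] at hxL
        simp at hxL
        rcases hxL with hx' | rfl | rfl
        · exact le_of_lt (hcross x hx')
        · exact le_refl x
        · exact absurd rfl hxM
      have hA : two_highest arg1 = [M, S] := by
        simp only [two_highest, if_neg hemp, if_neg h1, ← hLdef, hslice]
        simp [PySem.List.pyGet?, PySem.List.pyIdx?]
      rcases hst : arg1.foldl altStep (none, none) with ⟨b?, s?⟩
      rw [hst] at hinv
      match b?, s? with
      | none, s? => exact absurd hinv.1 hne
      | some b, none =>
        obtain ⟨hb, hball⟩ := hinv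
        have h2 := hball M hM
        have h3 := hball S hS
        omega
      | some b, some s =>
        obtain ⟨hb, hball, hs, hsb, hsall⟩ := hinv
        have hbM : b = M := le_antisymm (hMmax b hb) (hball M hM)
        have hsS : s = S := by
          have h2 : s ≤ S := hSsec s hs (by omega)
          have h3 : S ≤ s := hsall S hS (by omega)
          omega
        have hB : two_highest_alt arg1 = [b, s] := by simp [two_highest_alt, hst]
        rw [hA, hB, hbM, hsS]
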